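-- pv_equiv track=rewrite | github.com/Chriscrosser3310/qc_exciton_LCC | src/integrations/qualtran/block_encoding/lattice_index_oracles.py | _offset_table_1d
-- ===== SOURCE A (Python) =====
-- def _offset_table_1d(length: int, radius: int) -> list[int]:
--     """Unique periodic offsets preserving the natural [-R, ..., R] ordering."""
--     if radius < 0:
--         raise ValueError("radius must be >= 0.")
--     seen: set[int] = set()
--     offsets: list[int] = []
--     for d in range(-radius, radius + 1):
--         d_mod = d % length
--         if d_mod not in seen:
--             seen.add(d_mod)
--             offsets.append(d_mod)
--     return offsets
-- ===== SOURCE B (Python) =====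
-- def _offset_table_1d(length: int, radius: int) -> list[int]:
--     """Unique periodic offsets preserving the natural [-R, ..., R] ordering."""
--     if radius < 0:
--         raise ValueError("radius must be >= 0.")
--     start = (-radius) % length
--     return [(start + i) % length for i in range(min(2 * radius + 1, abs(length)))]
-- ===== Notes on version B (the rewrite author's own statement) =====
-- stated objective: simpler
-- what changed: Replaces A's dedup loop (a seen-set and membership test over every d in range(-radius, radius+1)) with a closed-form comprehension: the first min(2*radius+1, abs(length)) consecutive residues starting at (-radius) % length, since consecutive offsets step through residues mod length and first appearances are exactly that initial window.
import Mathlib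
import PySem

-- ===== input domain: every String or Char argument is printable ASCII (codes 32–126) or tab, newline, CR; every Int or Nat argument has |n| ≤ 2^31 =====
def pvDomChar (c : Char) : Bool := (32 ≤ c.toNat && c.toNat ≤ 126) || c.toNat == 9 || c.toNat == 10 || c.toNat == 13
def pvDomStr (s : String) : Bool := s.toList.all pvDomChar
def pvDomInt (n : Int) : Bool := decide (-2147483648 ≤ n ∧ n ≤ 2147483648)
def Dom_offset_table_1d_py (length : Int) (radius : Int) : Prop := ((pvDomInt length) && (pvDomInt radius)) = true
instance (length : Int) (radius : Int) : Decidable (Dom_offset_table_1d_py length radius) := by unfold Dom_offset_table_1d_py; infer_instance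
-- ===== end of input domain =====

-- B replaces A's dedup loop (set membership over range(-R, R+1)) with a closed-form list of the
-- first min(2*radius+1, abs(length)) consecutive residues starting at (-radius) % length; objective: simpler.

-- ===== PORT A =====
def pvStepA (length : Int) (st : PySem.Set Int × List Int) (d : Int) : PySem.Set Int × List Int :=
  let dmod := PySem.Int.mod d length
  if PySem.Set.contains st.1 dmod then st
  else (PySem.Set.add st.1 dmod, st.2 ++ [dmod])

def offset_table_1d_py (length : Int) (radius : Int) : List Int :=
  if radius < 0 then []   -- Python raises ValueError here; excluded by Pre_
  else ((PySem.List.pyRange (-radius) (radius + 1) 1).foldl (pvStepA length) (PySem.Set.empty, [])).2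

-- ===== PORT B =====
def offset_table_1d_py_alt (length : Int) (radius : Int) : List Int :=
  if radius < 0 then []   -- Python raises ValueError here; excluded by Pre_
  else
    let start := PySem.Int.mod (-radius) length
    (PySem.List.pyRange 0 (min (2 * radius + 1) |length|) 1).map
      (fun i => PySem.Int.mod (start + i) length)

-- ===== PRECONDITION & SPEC =====
-- Pre_ excludes exactly the inputs where the Python A raises: radius < 0 (ValueError) and
-- length = 0 (ZeroDivisionError from d % 0); B raises on exactly the same inputs.
def Pre_offset_table_1d_py (length : Int) (radius : Int) : Prop := 0 ≤ radius ∧ length ≠ 0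
instance (length : Int) (radius : Int) : Decidable (Pre_offset_table_1d_py length radius) := by
  unfold Pre_offset_table_1d_py; infer_instance

def pvWitness_offset_table_1d_py : Int × Int := (5, 3)

def Spec_offset_table_1d_py (length : Int) (radius : Int) (out : List Int) : Prop :=
  out = offset_table_1d_py_alt length radius
instance (length : Int) (radius : Int) (out : List Int) : Decidable (Spec_offset_table_1d_py length radius out) := by
  unfold Spec_offset_table_1d_py; infer_instance

-- ===== CLAIM (what is proved, stated in full; the proofs are below) =====
def Claim_equal_offset_table_1d_py : Prop := ∀ (length : Int) (radius : Int), Dom_offset_table_1d_py length radius → Pre_offset_table_1d_py length radius → Spec_offset_table_1d_py length radius (offset_table_1d_py length radius)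

-- ===== LEMMAS AND PROOFS =====

-- Python `a % L` (= Int.fmod) leaves the residue class of a mod L
theorem pv_dvd_sub_fmod (a L : Int) : L ∣ a - Int.fmod a L := by
  have h := Int.fmod_add_mul_fdiv a L
  have : a - Int.fmod a L = L * Int.fdiv a L := by omega
  rw [this]; exact Dvd.intro _ rfl

theorem pv_fmod_congr {a b L : Int} (h : L ∣ a - b) : Int.fmod a L = Int.fmod b L := by
  have he : a % L = b % L :=
    Int.emod_eq_emod_iff_emod_sub_eq_zero.mpr (Int.emod_eq_zero_of_dvd h)
  have hd : (L ∣ a) ↔ (L ∣ b) := by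
    constructor
    · intro hx; have := dvd_sub hx h; simpa using this
    · intro hx; have := dvd_add hx h; simpa [add_sub_cancel] using this
  simp [Int.fmod_eq_emod, he, hd]

theorem pv_fmod_eq_dvd {a b L : Int} (h : Int.fmod a L = Int.fmod b L) : L ∣ a - b := by
  have ha := pv_dvd_sub_fmod a L
  have hb := pv_dvd_sub_fmod b L
  have : a - b = (a - Int.fmod a L) - (b - Int.fmod b L) := by omega
  rw [this]; exact dvd_sub ha hb

-- the offsets produced so far: the first t consecutive residues starting at -R
def pvO (L R : Int) (t : Nat) : List Int :=
  (List.range t).map (fun (j : Nat) => PySem.Int.mod (-R + (j : Int)) L)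

theorem pv_inj {L : Int} {s : Int} {i j : Nat}
    (hi : i < L.natAbs) (hj : j < L.natAbs)
    (h : PySem.Int.mod (s + (i : Int)) L = PySem.Int.mod (s + (j : Int)) L) : i = j := by
  have hd : L ∣ (s + (i : Int)) - (s + (j : Int)) := pv_fmod_eq_dvd h
  have hd' : L ∣ ((i : Int) - (j : Int)) := by simpa using hd
  have habs : (L.natAbs : Int) ∣ ((i : Int) - (j : Int)) := by
    rwa [Int.natAbs_dvd]
  have hz : (i : Int) - (j : Int) = 0 := by
    apply Int.eq_zero_of_abs_lt_dvd habs
    rw [abs_sub_lt_iff]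
    constructor <;> omega
  omega

theorem pv_invariant (L R : Int) (hL : L ≠ 0) (t : Nat) :
    List.foldl (fun (st : PySem.Set Int × List Int) (k : Nat) => pvStepA L st (-R + (k : Int)))
      (PySem.Set.empty, ([] : List Int)) (List.range t)
      = (pvO L R (min t L.natAbs), pvO L R (min t L.natAbs)) := by
  induction t with
  | zero => simp [pvO, PySem.Set.empty]
  | succ t ih =>
    rw [List.range_succ, List.foldl_append, ih]
    simp only [List.foldl_cons, List.foldl_nil]
    by_cases hlt : t < L.natAbs
    · -- new residue: appended
      have hmin : min t L.natAbs = t := by omega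
      have hmin' : min (t + 1) L.natAbs = t + 1 := by omega
      have hnotmem : PySem.Int.mod (-R + (t : Int)) L ∉ pvO L R t := by
        intro hmem
        simp only [pvO, List.mem_map, List.mem_range] at hmem
        obtain ⟨j, hj, hje⟩ := hmem
        have : j = t := pv_inj (s := -R) (by omega) hlt hje
        omega
      rw [hmin] at ih ⊢
      simp only [pvStepA, hmin']
      rw [if_neg (by simp [PySem.Set.contains, hnotmem])]
      have hadd : PySem.Set.add (pvO L R t) (PySem.Int.mod (-R + (t : Int)) L)
          = pvO L R t ++ [PySem.Int.mod (-R + (t : Int)) L] := by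
        simp [PySem.Set.add, PySem.Set.contains, hnotmem]
      rw [hadd]
      simp [pvO, List.range_succ]
    · -- residue already present: state unchanged
      have hm : 0 < L.natAbs := Int.natAbs_pos.mpr hL
      have hmem : PySem.Int.mod (-R + (t : Int)) L ∈ pvO L R (min t L.natAbs) := by
        have h2 : L.natAbs ∣ (t - t % L.natAbs) := Nat.dvd_sub_mod t
        have h3 : (L.natAbs : Int) ∣ ((t : Int) - ((t % L.natAbs : Nat) : Int)) := by
          rw [← Nat.cast_sub (Nat.mod_le _ _)]
          exact_mod_cast h2
        have hLm : L ∣ (L.natAbs : Int) := Int.dvd_natAbs.mpr dvd_rfl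
        have h4 : L ∣ ((-R + (t : Int)) - (-R + ((t % L.natAbs : Nat) : Int))) := by
          have he : ((-R + (t : Int)) - (-R + ((t % L.natAbs : Nat) : Int)))
              = (t : Int) - ((t % L.natAbs : Nat) : Int) := by ring
          rw [he]
          exact dvd_trans hLm h3
        have heq : PySem.Int.mod (-R + (t : Int)) L
            = PySem.Int.mod (-R + ((t % L.natAbs : Nat) : Int)) L := pv_fmod_congr h4
        simp only [pvO, List.mem_map, List.mem_range]
        refine ⟨t % L.natAbs, ?_, heq.symm⟩
        rw [Nat.min_eq_right (Nat.le_of_not_lt hlt)]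
        exact Nat.mod_lt t hm
      have hmin : min (t + 1) L.natAbs = min t L.natAbs := by omega
      simp only [pvStepA, hmin]
      rw [if_pos (by simp [PySem.Set.contains, hmem])]

-- ===== VERDICT (by name: the statement is the Claim_ definition above) =====
theorem offset_table_1d_py_spec : Claim_equal_offset_table_1d_py := by
  intro L R _ hpre
  obtain ⟨hR, hL⟩ := hpre
  unfold Spec_offset_table_1d_py offset_table_1d_py offset_table_1d_py_alt
  rw [if_neg (by omega), if_neg (by omega)]
  rw [PySem.List.pyRange_one, PySem.List.pyRange_one, List.foldl_map, List.map_map]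
  rw [pv_invariant L R hL]
  have hn : (R + 1 - -R).toNat = (2 * R + 1).toNat := by omega
  have hK : (min (2 * R + 1) |L| - 0).toNat = min (2 * R + 1).toNat L.natAbs := by
    rw [Int.abs_eq_natAbs]; omega
  rw [hn, hK]
  unfold pvO
  apply List.map_congr_left
  intro k _
  apply pv_fmod_congr
  have hdvd := pv_dvd_sub_fmod (-R) L
  have h2 : (-R + (k : Int)) - (PySem.Int.mod (-R) L + ((0 : Int) + (k : Int)))
      = (-R) - Int.fmod (-R) L := by simp [PySem.Int.mod]
  rw [h2]
  exact hdvd
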